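-- pv_equiv track=rewrite | github.com/neulab/pr-arena | prompt_experiments/scripts/run_experiment.py | filter_binary_files_from_patch
-- ===== SOURCE A (Python) =====
-- def filter_binary_files_from_patch(patch: str) -> str:
--     """Filter out binary files and .pyc files from git patch.
--
--     Args:
--         patch: Git patch content
--
--     Returns:
--         Filtered patch without binary files
--     """
--     if not patch:
--         return patch
--
--     lines = patch.split('\n')
--     filtered_lines = []
--     skip_file = False
--     in_file = False
--
--     for i, line in enumerate(lines):
--         # Check for new file diff
--         if line.startswith('diff --git'):
--             # Check if this is a binary file or .pyc
--             file_path = line.split()[-1] if len(line.split()) > 2 else ''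
--
--             # Look ahead for binary file markers
--             skip_file = False
--             if file_path.endswith('.pyc') or file_path.endswith('.pyo'):
--                 skip_file = True
--             else:
--                 # Check next few lines for binary marker
--                 for j in range(i, min(i + 10, len(lines))):
--                     if 'Binary files' in lines[j] or 'GIT binary patch' in lines[j]:
--                         skip_file = True
--                         break
--
--             in_file = True
--             if not skip_file:
--                 filtered_lines.append(line)
--         elif line.startswith('diff --git') == False and in_file:
--             if not skip_file:
--                 filtered_lines.append(line)
--         else:
--             if not skip_file:
--                 filtered_lines.append(line)
--
--     return '\n'.join(filtered_lines)
-- ===== SOURCE B (Python) =====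
-- def filter_binary_files_from_patch(patch: str) -> str:
--     """Filter out binary files and .pyc files from git patch (block-wise rewrite)."""
--     if not patch:
--         return patch
--
--     lines = patch.split('\n')
--     n = len(lines)
--
--     def is_header(line: str) -> bool:
--         return line.startswith('diff --git')
--
--     def block_skips(i: int) -> bool:
--         toks = lines[i].split()
--         path = toks[-1] if len(toks) > 2 else ''
--         return path.endswith('.pyc') or path.endswith('.pyo') or any(
--             'Binary files' in lines[j] or 'GIT binary patch' in lines[j]
--             for j in range(i, min(i + 10, n)))
--
--     i = next((k for k, l in enumerate(lines) if is_header(l)), n)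
--     kept = lines[:i]
--     while i < n:
--         j = next((k for k in range(i + 1, n) if is_header(lines[k])), n)
--         if not block_skips(i):
--             kept.extend(lines[i:j])
--         i = j
--     return '\n'.join(kept)
-- ===== Notes on version B (the rewrite author's own statement) =====
-- stated objective: alternative
-- what changed: A's single per-line state machine threading skip_file/in_file flags is replaced by a block-wise pass: find the 'diff --git' header indices, decide one skip flag per block, and copy the prefix and each kept block wholesale.
import Mathlib
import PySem

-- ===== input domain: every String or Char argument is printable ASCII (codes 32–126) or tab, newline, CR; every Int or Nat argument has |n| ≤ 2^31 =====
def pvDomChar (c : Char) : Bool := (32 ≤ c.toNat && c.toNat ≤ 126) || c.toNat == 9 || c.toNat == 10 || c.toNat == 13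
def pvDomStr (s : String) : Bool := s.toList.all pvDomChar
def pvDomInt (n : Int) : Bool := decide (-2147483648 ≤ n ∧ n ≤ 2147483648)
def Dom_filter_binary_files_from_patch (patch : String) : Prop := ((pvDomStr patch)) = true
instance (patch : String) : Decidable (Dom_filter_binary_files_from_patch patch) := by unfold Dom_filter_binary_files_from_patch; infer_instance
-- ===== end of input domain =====

-- B replaces A's per-line state machine (skip_file/in_file flags) by a block-wise pass:
-- find the header indices, decide one skip flag per block, and copy whole kept blocks;
-- objective: alternative decomposition, same cost.

-- ===== PORT A =====
-- header test (shared text predicate)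
def pvIsHeader (line : String) : Bool := PySem.Str.startswith line "diff --git"

-- the look-ahead window scan of A: for j in range(i, min(i+10, len(lines))): if marker: skip=True; break
def pvBinWindowA (lines : List String) (i : Int) : Bool :=
  (PySem.List.pyRange i (min (i + 10) (PySem.List.len lines)) 1).foldl
    (fun sk j =>
      if PySem.Str.isIn "Binary files" (PySem.List.pyGetD lines j "")
         || PySem.Str.isIn "GIT binary patch" (PySem.List.pyGetD lines j "") then true else sk)
    false

-- A's skip decision at a header line
def pvSkipA (lines : List String) (i : Int) (line : String) : Bool :=
  let toks := PySem.Str.split₀ line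
  let filePath := if toks.length > 2 then PySem.List.pyGetD toks (-1) "" else ""
  if PySem.Str.endswith filePath ".pyc" || PySem.Str.endswith filePath ".pyo" then true
  else pvBinWindowA lines i

def filter_binary_files_from_patch (patch : String) : String :=
  if patch = "" then patch
  else
    let lines := (PySem.Str.split? patch "\n").getD []
    let st := (PySem.List.enumerate lines 0).foldl
      (fun (st : List String × Bool × Bool) p =>
        let filtered := st.1; let skip := st.2.1; let inFile := st.2.2
        let i := p.1; let line := p.2
        if PySem.Str.startswith line "diff --git" then
          let sk := pvSkipA lines i line
          ((if !sk then filtered ++ [line] else filtered), sk, true)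
        else if (PySem.Str.startswith line "diff --git" == false) && inFile then
          ((if !skip then filtered ++ [line] else filtered), skip, inFile)
        else
          ((if !skip then filtered ++ [line] else filtered), skip, inFile))
      ([], false, false)
    PySem.Str.join "\n" st.1

-- ===== PORT B =====
-- B's skip decision for the block headed at index i (pyc/pyo path, or a marker in the window)
def pvSkipB (lines : List String) (i : Int) : Bool :=
  let toks := PySem.Str.split₀ (PySem.List.pyGetD lines i "")
  let path := if toks.length > 2 then PySem.List.pyGetD toks (-1) "" else ""
  PySem.Str.endswith path ".pyc" || PySem.Str.endswith path ".pyo"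
    || (PySem.List.pyRange i (min (i + 10) (PySem.List.len lines)) 1).any
         (fun j => PySem.Str.isIn "Binary files" (PySem.List.pyGetD lines j "")
                   || PySem.Str.isIn "GIT binary patch" (PySem.List.pyGetD lines j ""))

-- next((k for k in range(k, n) if is_header(lines[k])), n)
def pvNextHeader (lines : List String) (n k : Nat) : Nat :=
  if _h : k < n then
    if pvIsHeader (PySem.List.pyGetD lines (k : Int) "") then k else pvNextHeader lines n (k + 1)
  else k
termination_by n - k

theorem pvNextHeader_ge (lines : List String) (n k : Nat) : k ≤ pvNextHeader lines n k := by
  unfold pvNextHeader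
  split
  · split
    · exact le_refl k
    · exact le_trans (Nat.le_succ k) (pvNextHeader_ge lines n (k + 1))
  · exact le_refl k
termination_by n - k

-- the block loop of B: at a header index i, keep lines[i:j] unless the block is skipped
def pvGoB (lines : List String) (n i : Nat) : List String :=
  if _h : i < n then
    (if !pvSkipB lines (i : Int) then
        PySem.List.slice lines (some (i : Int)) (some ((pvNextHeader lines n (i + 1) : Nat) : Int))
      else [])
      ++ pvGoB lines n (pvNextHeader lines n (i + 1))
  else []
termination_by n - i
decreasing_by
  have := pvNextHeader_ge lines n (i + 1); omega

def filter_binary_files_from_patch_alt (patch : String) : String :=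
  if patch = "" then patch
  else
    let lines := (PySem.Str.split? patch "\n").getD []
    let n := lines.length
    let i := pvNextHeader lines n 0
    let kept := PySem.List.slice lines none (some (i : Int)) ++ pvGoB lines n i
    PySem.Str.join "\n" kept

-- ===== PRECONDITION & SPEC =====
def Spec_filter_binary_files_from_patch (patch : String) (out : String) : Prop := out = filter_binary_files_from_patch_alt patch
instance (patch : String) (out : String) : Decidable (Spec_filter_binary_files_from_patch patch out) := by unfold Spec_filter_binary_files_from_patch; infer_instance

-- ===== CLAIM (what is proved, stated in full; the proofs are below) =====
def Claim_equal_filter_binary_files_from_patch : Prop := ∀ (patch : String), Dom_filter_binary_files_from_patch patch → Spec_filter_binary_files_from_patch patch (filter_binary_files_from_patch patch)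

-- ===== LEMMAS AND PROOFS =====

theorem pvNextHeader_step (lines : List String) (n k : Nat) (h : k < n) :
    pvNextHeader lines n k
      = if pvIsHeader (PySem.List.pyGetD lines (k : Int) "") then k
        else pvNextHeader lines n (k + 1) := by
  conv_lhs => rw [pvNextHeader]
  rw [dif_pos h]

-- keep-list of A's loop as a pure recursion over the remaining lines (proof-side only)
def pvFA (lines : List String) : List String → Int → Bool → List String
  | [], _, _ => []
  | l :: rest, i, s =>
    if pvIsHeader l then
      (if pvSkipA lines i l then [] else [l]) ++ pvFA lines rest (i + 1) (pvSkipA lines i l)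
    else (if s then [] else [l]) ++ pvFA lines rest (i + 1) s

theorem pvFoldA (lines : List String) : ∀ (ls : List String) (i : Int) (s b : Bool) (acc : List String),
    ((PySem.List.enumerate ls i).foldl
      (fun (st : List String × Bool × Bool) p =>
        let filtered := st.1; let skip := st.2.1; let inFile := st.2.2
        let i := p.1; let line := p.2
        if PySem.Str.startswith line "diff --git" then
          let sk := pvSkipA lines i line
          ((if !sk then filtered ++ [line] else filtered), sk, true)
        else if (PySem.Str.startswith line "diff --git" == false) && inFile then
          ((if !skip then filtered ++ [line] else filtered), skip, inFile)
        else
          ((if !skip then filtered ++ [line] else filtered), skip, inFile))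
      (acc, s, b)).1 = acc ++ pvFA lines ls i s
  | [], i, s, b, acc => by simp [PySem.List.enumerate_nil, pvFA]
  | l :: rest, i, s, b, acc => by
    rw [PySem.List.enumerate_cons]
    by_cases hh : pvIsHeader l
    · simp only [List.foldl_cons]
      have : PySem.Str.startswith l "diff --git" = true := hh
      simp only [this, if_true]
      rw [pvFoldA lines rest (i + 1)]
      cases hsk : pvSkipA lines i l <;> simp [pvFA, hh, hsk]
    · simp only [List.foldl_cons]
      have : PySem.Str.startswith l "diff --git" = false := by
        simpa [pvIsHeader] using hh
      simp only [this, Bool.false_eq_true, if_false, beq_self_eq_true, Bool.true_and]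
      rw [ite_self]
      rw [pvFoldA lines rest (i + 1)]
      cases s <;> simp [pvFA, hh]

-- A's header skip decision agrees with B's, at a real header index
theorem pvSkip_eq (lines : List String) (k : Nat) (hk : k < lines.length) :
    pvSkipA lines (k : Int) lines[k] = pvSkipB lines (k : Int) := by
  unfold pvSkipA pvSkipB pvBinWindowA
  have hget : PySem.List.pyGetD lines (k : Int) "" = lines[k] := by
    simp [PySem.List.pyGetD_natCast, List.getD_eq_getElem?_getD, hk]
  rw [hget]
  rw [PySem.List.foldl_if_true_eq]
  cases PySem.Str.endswith
      (if (PySem.Str.split₀ lines[k]).length > 2 then PySem.List.pyGetD (PySem.Str.split₀ lines[k]) (-1) "" else "") ".pyc" <;>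
    cases PySem.Str.endswith
      (if (PySem.Str.split₀ lines[k]).length > 2 then PySem.List.pyGetD (PySem.Str.split₀ lines[k]) (-1) "" else "") ".pyo" <;>
    simp

theorem pvNextHeader_le (lines : List String) (n k : Nat) (hk : k ≤ n) : pvNextHeader lines n k ≤ n := by
  unfold pvNextHeader
  split
  · split
    · omega
    · exact pvNextHeader_le lines n (k + 1) (by omega)
  · omega
termination_by n - k

theorem pvNextHeader_eq (lines : List String) (k : Nat) (hk : k ≤ lines.length) :
    pvNextHeader lines lines.length k
      = k + ((lines.drop k).takeWhile (fun l => !pvIsHeader l)).length := by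
  unfold pvNextHeader
  split
  · rename_i h
    have hget : PySem.List.pyGetD lines (k : Int) "" = lines[k] := by
      simp [PySem.List.pyGetD_natCast, List.getD_eq_getElem?_getD, h]
    rw [hget]
    have hdrop : lines.drop k = lines[k] :: lines.drop (k + 1) :=
      List.drop_eq_getElem_cons h
    rw [hdrop]
    by_cases hh : pvIsHeader lines[k]
    · simp [hh, List.takeWhile_cons]
    · have : pvIsHeader lines[k] = false := by simpa using hh
      rw [if_neg (by simp [this])]
      rw [pvNextHeader_eq lines (k + 1) (by omega)]
      rw [List.takeWhile_cons, if_pos (by simp [this])]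
      simp
      omega
  · rename_i h
    have : lines.drop k = [] := List.drop_eq_nil_of_le (by omega)
    simp [this]
termination_by lines.length - k

theorem pvMain (lines : List String) (k : Nat) (s : Bool) (hk : k ≤ lines.length) :
    pvFA lines (lines.drop k) (k : Int) s
      = (if s then [] else (lines.drop k).takeWhile (fun l => !pvIsHeader l))
        ++ pvGoB lines lines.length (pvNextHeader lines lines.length k) := by
  by_cases hlt : k < lines.length
  · have hdrop : lines.drop k = lines[k] :: lines.drop (k + 1) :=
      List.drop_eq_getElem_cons hlt
    have hget : PySem.List.pyGetD lines (k : Int) "" = lines[k] := by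
      simp [PySem.List.pyGetD_natCast, List.getD_eq_getElem?_getD, hlt]
    have hcast : (k : Int) + 1 = ((k + 1 : Nat) : Int) := by push_cast; ring
    by_cases hh : pvIsHeader lines[k]
    · -- header line: one whole block
      have hNHk : pvNextHeader lines lines.length k = k := by
        rw [pvNextHeader_step lines lines.length k hlt, hget, if_pos hh]
      have hj := pvNextHeader_eq lines (k + 1) (by omega)
      have hjle := pvNextHeader_le lines lines.length (k + 1) (by omega)
      have hjge := pvNextHeader_ge lines lines.length (k + 1)
      rw [hNHk]
      rw [pvGoB]
      rw [dif_pos hlt]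
      have hIH := pvMain lines (k + 1) (pvSkipA lines (k : Int) lines[k]) (by omega)
      rw [hdrop]
      show (if pvIsHeader lines[k] then _ else _) = _
      rw [if_pos hh]
      rw [hcast, hIH]
      -- the slice is the header line followed by the non-header tail
      have hslice : PySem.List.slice lines (some (k : Int))
          (some ((pvNextHeader lines lines.length (k + 1) : Nat) : Int))
          = lines[k] :: ((lines.drop (k + 1)).takeWhile (fun l => !pvIsHeader l)) := by
        rw [PySem.List.slice_natCast, hdrop]
        have htw : ((lines.drop (k + 1)).takeWhile (fun l => !pvIsHeader l))
            = (lines.drop (k + 1)).take ((lines.drop (k + 1)).takeWhile (fun l => !pvIsHeader l)).length := by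
          have := List.takeWhile_prefix (l := lines.drop (k + 1)) (p := fun l => !pvIsHeader l)
          exact (List.prefix_iff_eq_take.mp this)
        have : pvNextHeader lines lines.length (k + 1) - k
            = ((lines.drop (k + 1)).takeWhile (fun l => !pvIsHeader l)).length + 1 := by omega
        rw [this, List.take_succ_cons, ← htw]
      rw [hslice]
      rw [pvSkip_eq lines k hlt]
      cases hsk : pvSkipB lines (k : Int) <;> simp [hsk, hh]
    · -- non-header line inside the current region
      have hNHk : pvNextHeader lines lines.length k = pvNextHeader lines lines.length (k + 1) := by
        rw [pvNextHeader_step lines lines.length k hlt, hget, if_neg (by simpa using hh)]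
      have hIH := pvMain lines (k + 1) s (by omega)
      rw [hdrop]
      show (if pvIsHeader lines[k] then _ else _) = _
      rw [if_neg hh, hcast, hIH, hNHk]
      cases s
      · rw [List.takeWhile_cons]
        simp [hh]
      · simp
  · have hk' : k = lines.length := by omega
    have hdrop : lines.drop k = [] := List.drop_eq_nil_of_le (by omega)
    have hNHk : pvNextHeader lines lines.length k = k := by
      unfold pvNextHeader; rw [dif_neg (by omega)]
    rw [hdrop, hNHk, pvGoB, dif_neg (by omega)]
    simp [pvFA]
termination_by lines.length - k

-- ===== VERDICT (by name: the statement is the Claim_ definition above) =====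
theorem filter_binary_files_from_patch_spec : Claim_equal_filter_binary_files_from_patch := by
  intro patch _
  unfold Spec_filter_binary_files_from_patch
  unfold filter_binary_files_from_patch filter_binary_files_from_patch_alt
  by_cases hp : patch = ""
  · simp [hp]
  · rw [if_neg hp, if_neg hp]
    set lines := (PySem.Str.split? patch "\n").getD [] with hlines
    have hA := pvFoldA lines lines 0 false false []
    have hM := pvMain lines 0 false (by omega)
    simp only [List.drop_zero, Nat.cast_zero] at hM
    have h0 : pvNextHeader lines lines.length 0
        = (lines.takeWhile (fun l => !pvIsHeader l)).length := by
      simpa using pvNextHeader_eq lines 0 (by omega)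
    have hslice : PySem.List.slice lines none (some ((pvNextHeader lines lines.length 0 : Nat) : Int))
        = lines.takeWhile (fun l => !pvIsHeader l) := by
      rw [PySem.List.slice_to_natCast, h0]
      exact (List.prefix_iff_eq_take.mp (List.takeWhile_prefix _)).symm
    simp only []
    rw [hA]
    have : pvFA lines lines (0 : Int) false
        = lines.takeWhile (fun l => !pvIsHeader l) ++ pvGoB lines lines.length (pvNextHeader lines lines.length 0) := by
      simpa using hM
    rw [this, ← hslice, List.nil_append]
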